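-- pv_equiv track=rewrite | github.com/jina0924/TIL | 03_01_algorithm_practice/SWEA/4873_반복문자지우기/s1.py | no_repeat
-- ===== SOURCE A (Python) =====
-- def no_repeat(arr):                     # 반복문자 지운 문자열의 길이 구하는 함수
--     my_stack = []                       # 빈 스택
--     for elem in arr:                    # 입력받은 매개변수 하나씩 살펴보기
--         if my_stack:                    # 만약 스택에 요소가 있다면
--             if my_stack[-1] == elem:    # 현재 살펴보는 요소가 스택에 있다면 반복되는 문자이므로
--                 my_stack.pop()          # 스택에서 요소를 빼주고 다음 반복 시행함
--             else:                       # 만약 스택에 없다면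
--                 my_stack.append(elem)   # 스택에 해당 문자 넣어줌
--         else:                           # 만일 스택이 비어있다면 반복되는 문자가 없다는 뜻이므로
--             my_stack.append(elem)       # 스택에 요소를 채워줌
--     return len(my_stack)
-- ===== SOURCE B (Python) =====
-- def no_repeat(arr):
--     s = list(arr)
--     while True:
--         found = False
--         for j in range(len(s) - 1):
--             if s[j] == s[j + 1]:
--                 del s[j:j + 2]
--                 found = True
--                 break
--         if not found:
--             break
--     return len(s)
-- ===== Notes on version B (the rewrite author's own statement) =====
-- stated objective: alternative
-- what changed: Replaces the single linear stack pass by repeated scans that delete the first adjacent equal pair until none remains; equivalence rests on confluence of adjacent-pair cancellation.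
import Mathlib
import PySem

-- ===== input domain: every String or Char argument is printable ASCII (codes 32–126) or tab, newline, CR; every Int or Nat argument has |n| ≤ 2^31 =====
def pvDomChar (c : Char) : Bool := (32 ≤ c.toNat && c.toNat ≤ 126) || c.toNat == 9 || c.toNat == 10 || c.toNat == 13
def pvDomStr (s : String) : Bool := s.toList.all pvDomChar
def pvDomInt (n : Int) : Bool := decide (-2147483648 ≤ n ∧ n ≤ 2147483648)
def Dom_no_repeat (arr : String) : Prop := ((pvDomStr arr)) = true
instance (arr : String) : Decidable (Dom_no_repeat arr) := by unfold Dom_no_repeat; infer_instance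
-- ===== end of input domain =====

-- B replaces A's single stack pass by repeated scans deleting the first adjacent equal pair
-- until none remains (objective: alternative; same results by confluence of pair cancellation).

-- ===== PORT A =====
-- literal stack pass: my_stack[-1] is getLast? (the stack is nonempty in that branch)
def no_repeat (arr : String) : Int :=
  ((arr.toList.foldl (fun my_stack elem =>
    if my_stack ≠ [] then
      if my_stack.getLast? = some elem then my_stack.dropLast
      else my_stack ++ [elem]
    else my_stack ++ [elem]) ([] : List Char)).length : Int)

-- ===== PORT B =====
-- the inner for-loop of Source B: scan for the first adjacent equal pair; delete it (some rest) or report none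
def findDelFirstPair : List Char → Option (List Char)
  | [] => none
  | [_] => none
  | a :: b :: t => if a = b then some t else (findDelFirstPair (b :: t)).map (a :: ·)

theorem findDelFirstPair_length {s t : List Char} (h : findDelFirstPair s = some t) :
    t.length < s.length := by
  induction s generalizing t with
  | nil => simp [findDelFirstPair] at h
  | cons a s ih =>
    match s, h with
    | [], h => simp [findDelFirstPair] at h
    | b :: s, h =>
      rw [findDelFirstPair] at h
      split at h
      · cases h; simp
      · simp only [Option.map_eq_some_iff] at h
        obtain ⟨r, hr, rfl⟩ := h
        have := ih hr
        simp at this ⊢; omega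

-- the outer while-loop of Source B: repeat until no adjacent equal pair remains
def reduceLoop (s : List Char) : List Char :=
  match h : findDelFirstPair s with
  | none => s
  | some t => reduceLoop t
termination_by s.length
decreasing_by exact findDelFirstPair_length h

def no_repeat_alt (arr : String) : Int := ((reduceLoop arr.toList).length : Int)

-- ===== PRECONDITION & SPEC =====
def Spec_no_repeat (arr : String) (out : Int) : Prop := out = no_repeat_alt arr
instance (arr : String) (out : Int) : Decidable (Spec_no_repeat arr out) := by unfold Spec_no_repeat; infer_instance

-- ===== CLAIM (what is proved, stated in full; the proofs are below) =====
def Claim_equal_no_repeat : Prop := ∀ (arr : String), Dom_no_repeat arr → Spec_no_repeat arr (no_repeat arr)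

-- ===== LEMMAS AND PROOFS =====

-- front-of-list version of A's stack step (top element at the head)
def stepF (st : List Char) (c : Char) : List Char :=
  match st with
  | [] => [c]
  | a :: t => if a = c then t else c :: a :: t

theorem stepA_eq_stepF (σ : List Char) (c : Char) :
    (if σ.reverse ≠ [] then
      if σ.reverse.getLast? = some c then σ.reverse.dropLast
      else σ.reverse ++ [c]
    else σ.reverse ++ [c]) = (stepF σ c).reverse := by
  cases σ with
  | nil => simp [stepF]
  | cons a t =>
    by_cases hac : a = c <;> simp [stepF, hac]

theorem foldA_eq_foldF (l : List Char) (σ : List Char) :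
    l.foldl (fun my_stack elem =>
      if my_stack ≠ [] then
        if my_stack.getLast? = some elem then my_stack.dropLast
        else my_stack ++ [elem]
      else my_stack ++ [elem]) σ.reverse = (l.foldl stepF σ).reverse := by
  induction l generalizing σ with
  | nil => rfl
  | cons c l ih =>
    simp only [List.foldl_cons, stepA_eq_stepF σ c]
    exact ih (stepF σ c)

theorem chain_stepF {σ : List Char} (h : List.IsChain (· ≠ ·) σ) (c : Char) :
    List.IsChain (· ≠ ·) (stepF σ c) := by
  cases σ with
  | nil => simp [stepF]
  | cons a t =>
    by_cases hac : a = c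
    · simpa [stepF, hac] using h.of_cons
    · simpa [stepF, hac, Ne.symm hac] using h

theorem stepF_stepF {σ : List Char} (h : List.IsChain (· ≠ ·) σ) (c : Char) :
    stepF (stepF σ c) c = σ := by
  cases σ with
  | nil => simp [stepF]
  | cons a t =>
    by_cases hac : a = c
    · subst hac
      cases t with
      | nil => simp [stepF]
      | cons b t' =>
        have hba : a ≠ b := (List.isChain_cons_cons.mp h).1
        simp [stepF, Ne.symm hba]
    · simp [stepF, hac]

theorem foldF_del {s t : List Char} (h : findDelFirstPair s = some t) :
    ∀ σ : List Char, List.IsChain (· ≠ ·) σ → s.foldl stepF σ = t.foldl stepF σ := by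
  induction s generalizing t with
  | nil => simp [findDelFirstPair] at h
  | cons a s ih =>
    match s, h with
    | [], h => simp [findDelFirstPair] at h
    | b :: s, h =>
      rw [findDelFirstPair] at h
      intro σ hσ
      split at h
      · rename_i hab
        cases h
        subst hab
        simp only [List.foldl_cons, stepF_stepF hσ]
      · simp only [Option.map_eq_some_iff] at h
        obtain ⟨r, hr, rfl⟩ := h
        simp only [List.foldl_cons]
        exact ih hr (stepF σ a) (chain_stepF hσ a)

theorem chain_of_none {s : List Char} (h : findDelFirstPair s = none) :
    List.IsChain (· ≠ ·) s := by
  induction s with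
  | nil => simp
  | cons a s ih =>
    match s, h with
    | [], _ => simp
    | b :: s, h =>
      rw [findDelFirstPair] at h
      split at h
      · simp at h
      · rename_i hab
        simp only [Option.map_eq_none_iff] at h
        exact List.isChain_cons_cons.mpr ⟨hab, ih h⟩

theorem foldF_of_chain {s : List Char} (h : List.IsChain (· ≠ ·) s) :
    ∀ σ : List Char, (∀ a ∈ s.head?, ∀ b ∈ σ.head?, a ≠ b) →
      s.foldl stepF σ = s.reverse ++ σ := by
  induction s with
  | nil => simp
  | cons a s ih =>
    intro σ hhd
    have hpush : stepF σ a = a :: σ := by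
      cases σ with
      | nil => rfl
      | cons x t =>
        have : a ≠ x := hhd a (by simp) x (by simp)
        simp [stepF, Ne.symm this]
    simp only [List.foldl_cons, hpush]
    rw [ih h.of_cons (a :: σ) ?_]
    · simp
    · intro p hp q hq
      simp only [Option.mem_def, List.head?_cons, Option.some.injEq] at hq
      cases s with
      | nil => simp at hp
      | cons b s' =>
        simp only [Option.mem_def, List.head?_cons, Option.some.injEq] at hp
        subst hp; subst hq
        exact (List.isChain_cons_cons.mp h).1.symm

theorem reduceLoop_none (s : List Char) : findDelFirstPair (reduceLoop s) = none := by
  induction s using reduceLoop.induct with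
  | case1 s h => rw [reduceLoop, h]; exact h
  | case2 s t h ih => rw [reduceLoop, h]; exact ih

theorem foldF_reduceLoop (s : List Char) :
    s.foldl stepF [] = (reduceLoop s).foldl stepF [] := by
  induction s using reduceLoop.induct with
  | case1 s h => rw [reduceLoop, h]
  | case2 s t h ih => rw [reduceLoop, h, foldF_del h [] (by simp), ih]

-- ===== VERDICT (by name: the statement is the Claim_ definition above) =====
theorem no_repeat_spec : Claim_equal_no_repeat := by
  intro arr _
  unfold Spec_no_repeat no_repeat no_repeat_alt
  have hA := foldA_eq_foldF arr.toList []
  simp only [List.reverse_nil] at hA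
  rw [hA, foldF_reduceLoop arr.toList]
  have hnone := reduceLoop_none arr.toList
  rw [foldF_of_chain (chain_of_none hnone) [] (by simp)]
  simp
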